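-- pv_equiv track=rewrite | github.com/sou-gk/atcoder-codes | arc164/arc164_a.py | can_represent
-- ===== SOURCE A (Python) =====
-- def can_represent(N, K):
--     digits = []
--     while N > 0:
--         digits.append(N % 3)
--         N //= 3
--
--     if K > len(digits):
--         return "No"
--
--     for i in range(K):
--         if digits[i] != 0:
--             return "No"
--
--     return "Yes"
-- ===== SOURCE B (Python) =====
-- def can_represent(N, K):
--     if K <= 0:
--         return "Yes"
--     if N <= 0:
--         return "No"
--     if K > N.bit_length():
--         return "No"  # 3**K >= 2**K > N, so 3**K cannot divide the positive N
--     return "Yes" if N % 3 ** K == 0 else "No"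
-- ===== Notes on version B (the rewrite author's own statement) =====
-- stated objective: simpler
-- what changed: Replaced the base-3 digit-extraction loop and digit scan by a direct divisibility test N % 3**K == 0 (with K<=0, N<=0 and K > N.bit_length() handled first), since the lowest K base-3 digits of a positive N are all zero exactly when 3^K divides N.
import Mathlib
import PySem

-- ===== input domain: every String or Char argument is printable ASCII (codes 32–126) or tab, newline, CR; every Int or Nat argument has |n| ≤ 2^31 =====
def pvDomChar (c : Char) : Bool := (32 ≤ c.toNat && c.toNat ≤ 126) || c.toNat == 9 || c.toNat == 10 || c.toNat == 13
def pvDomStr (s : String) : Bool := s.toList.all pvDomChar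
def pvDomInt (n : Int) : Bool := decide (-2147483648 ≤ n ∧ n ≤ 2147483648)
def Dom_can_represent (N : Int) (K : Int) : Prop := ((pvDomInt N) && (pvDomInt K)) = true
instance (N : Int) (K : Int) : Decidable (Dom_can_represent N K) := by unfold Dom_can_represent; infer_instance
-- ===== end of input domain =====

-- B replaces A's base-3 digit-extraction loop and scan by a single divisibility test (simpler).

-- ===== PORT A =====
-- while N > 0: digits.append(N % 3); N //= 3
def digitsA (N : Int) : List Int :=
  if _h : 0 < N then
    PySem.Int.mod N 3 :: digitsA (PySem.Int.floordiv N 3)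
  else []
termination_by N.toNat
decreasing_by
  rw [PySem.Int.floordiv_eq_ediv_of_pos (by omega : (0:Int) < 3)]
  omega

-- for i in range(K): if digits[i] != 0: return "No"  (after it: return "Yes")
def scanA (digits : List Int) : List Int → String
  | [] => "Yes"
  | i :: rest =>
    match PySem.List.pyGet? digits i with
    | some d => if d ≠ 0 then "No" else scanA digits rest
    | none => "No"   -- IndexError; unreachable here since the loop runs only with K ≤ len(digits)

def can_represent (N : Int) (K : Int) : String :=
  let digits := digitsA N
  if K > (digits.length : Int) then "No"
  else scanA digits (PySem.List.pyRange 0 K 1)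

-- ===== PORT B =====
def can_represent_alt (N : Int) (K : Int) : String :=
  if K ≤ 0 then "Yes"
  else if N ≤ 0 then "No"
  else if K > (PySem.Int.bitLength N : Int) then "No"  -- 3^K ≥ 2^K > N, so 3^K ∤ N
  else if PySem.Int.mod N ((3:Int) ^ K.toNat) = 0 then "Yes" else "No"

-- ===== PRECONDITION & SPEC =====
def Spec_can_represent (N : Int) (K : Int) (out : String) : Prop := out = can_represent_alt N K
instance (N : Int) (K : Int) (out : String) : Decidable (Spec_can_represent N K out) := by unfold Spec_can_represent; infer_instance

-- ===== CLAIM (what is proved, stated in full; the proofs are below) =====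
def Claim_equal_can_represent : Prop := ∀ (N : Int) (K : Int), Dom_can_represent N K → Spec_can_represent N K (can_represent N K)

-- ===== LEMMAS AND PROOFS =====

theorem scanA_eq_yes_iff (digits : List Int) (l : List Int) :
    scanA digits l = "Yes" ↔ ∀ i ∈ l, PySem.List.pyGet? digits i = some 0 := by
  induction l with
  | nil => simp [scanA]
  | cons i rest ih =>
    cases h : PySem.List.pyGet? digits i with
    | none =>
      simp only [scanA, h]
      constructor
      · intro hc; exact absurd hc (by decide)
      · intro hc
        have := hc i (by simp)
        simp [this] at h
    | some d =>
      by_cases hd : d = 0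
      · subst hd; simp [scanA, h, ih]
      · simp only [scanA, h, if_pos hd]
        constructor
        · intro hc; exact absurd hc (by decide)
        · intro hc
          have := hc i (by simp)
          rw [h] at this
          exact absurd (Option.some.inj this) hd

theorem scanA_yes_or_no (digits : List Int) (l : List Int) :
    scanA digits l = "Yes" ∨ scanA digits l = "No" := by
  induction l with
  | nil => left; rfl
  | cons i rest ih =>
    simp only [scanA]
    cases PySem.List.pyGet? digits i with
    | none => right; rfl
    | some d =>
      by_cases hd : d = 0
      · simpa [hd] using ih
      · right; simp [hd]

theorem digitsA_pos (N : Int) (h : 0 < N) :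
    digitsA N = N % 3 :: digitsA (N / 3) := by
  rw [digitsA]
  rw [dif_pos h (c := 0 < N), PySem.Int.mod_eq_emod_of_pos (by omega : (0:Int) < 3),
      PySem.Int.floordiv_eq_ediv_of_pos (by omega : (0:Int) < 3)]

theorem digitsA_nonpos (N : Int) (h : ¬ 0 < N) : digitsA N = [] := by
  rw [digitsA]; simp [h]

-- core: the lowest k base-3 digits of a positive N are all zero (and exist) iff 3^k ∣ N
theorem digits_zero_iff_dvd (k : Nat) : ∀ (N : Int), 0 < N →
    ((k ≤ (digitsA N).length ∧ ∀ j < k, (digitsA N)[j]? = some 0) ↔ (3:Int) ^ k ∣ N) := by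
  induction k with
  | zero => intro N _; simp
  | succ k ih =>
    intro N hN
    rw [digitsA_pos N hN]
    have hsplit : (3:Int) ^ (k + 1) ∣ N ↔ N % 3 = 0 ∧ (3:Int) ^ k ∣ N / 3 := by
      constructor
      · intro ⟨m, hm⟩
        have h3 : (3:Int) ∣ N := ⟨3 ^ k * m, by rw [hm]; ring⟩
        have hmod : N % 3 = 0 := Int.emod_eq_zero_of_dvd h3
        refine ⟨hmod, ?_⟩
        have : N / 3 = 3 ^ k * m := by
          rw [hm]; rw [show (3:Int) ^ (k+1) * m = 3 * (3 ^ k * m) by ring]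
          exact Int.mul_ediv_cancel_left _ (by norm_num)
        exact ⟨m, this⟩
      · intro ⟨hmod, m, hm⟩
        have h3 : (3:Int) ∣ N := Int.dvd_of_emod_eq_zero hmod
        obtain ⟨q, hq⟩ := h3
        have hq' : q = N / 3 := by omega
        exact ⟨m, by rw [hq, hq' , hm]; ring⟩
    by_cases hmod : N % 3 = 0
    · -- first digit zero; recurse into N / 3
      have h3 : (3:Int) ∣ N := Int.dvd_of_emod_eq_zero hmod
      have hq : 0 < N / 3 := by
        obtain ⟨q, hqe⟩ := h3; omega
      have := ih (N / 3) hq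
      rw [hsplit]
      constructor
      · rintro ⟨hlen, hall⟩
        refine ⟨hmod, this.mp ⟨by simpa using hlen, fun j hj => ?_⟩⟩
        simpa using hall (j + 1) (by omega)
      · rintro ⟨_, hdvd⟩
        obtain ⟨hlen, hall⟩ := this.mpr hdvd
        refine ⟨by simpa using hlen, fun j hj => ?_⟩
        cases j with
        | zero => simpa using hmod
        | succ j => simpa using hall j (by omega)
    · -- first digit nonzero: both sides false
      rw [hsplit]
      constructor
      · rintro ⟨_, hall⟩
        exact absurd (by simpa using hall 0 (by omega)) hmod
      · rintro ⟨h, _⟩; exact absurd h hmod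

-- convert the integer-indexed range condition to the Nat-indexed one
theorem range_cond_iff (digits : List Int) (K : Int) (hK : 0 < K) :
    (∀ i ∈ PySem.List.pyRange 0 K 1, PySem.List.pyGet? digits i = some 0) ↔
    (∀ j < K.toNat, digits[j]? = some 0) := by
  constructor
  · intro h j hj
    have := h (j : Int) (by rw [PySem.List.mem_pyRange_one]; omega)
    simpa [PySem.List.pyGet?_natCast] using this
  · intro h i hi
    rw [PySem.List.mem_pyRange_one] at hi
    have : i = ((i.toNat : Nat) : Int) := by omega
    rw [this, PySem.List.pyGet?_natCast]
    exact h i.toNat (by omega)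

-- ===== VERDICT (by name: the statement is the Claim_ definition above) =====
theorem can_represent_spec : Claim_equal_can_represent := by
  intro N K _
  unfold Spec_can_represent can_represent can_represent_alt
  by_cases hK : K ≤ 0
  · -- range(K) empty, K ≤ 0 ≤ len: A returns "Yes"
    have h1 : ¬ K > ((digitsA N).length : Int) := by
      have : (0:Int) ≤ ((digitsA N).length : Int) := by positivity
      omega
    simp [h1, hK, PySem.List.pyRange_one_eq_nil (by omega : K ≤ 0), scanA]
  · by_cases hN : N ≤ 0
    · -- digits empty, K ≥ 1 > 0 = len: "No"
      have hd : digitsA N = [] := digitsA_nonpos N (by omega)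
      simp only [hd, List.length_nil, Nat.cast_zero, gt_iff_lt]
      rw [if_pos (by omega : (0:Int) < K), if_neg hK, if_pos hN]
    · -- N > 0, K ≥ 1
      push Not at hK hN
      have hcore := digits_zero_iff_dvd K.toNat N hN
      have hA : (if K > ((digitsA N).length : Int) then "No"
                 else scanA (digitsA N) (PySem.List.pyRange 0 K 1))
              = (if (3:Int) ^ K.toNat ∣ N then "Yes" else "No") := by
        by_cases hdvd : (3:Int) ^ K.toNat ∣ N
        · obtain ⟨hlen, hall⟩ := hcore.mpr hdvd
          have h1 : ¬ K > ((digitsA N).length : Int) := by omega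
          rw [if_neg h1, if_pos hdvd]
          rw [scanA_eq_yes_iff]
          exact (range_cond_iff _ K hK).mpr hall
        · rw [if_neg hdvd]
          by_cases h1 : K > ((digitsA N).length : Int)
          · rw [if_pos h1]
          · rw [if_neg h1]
            rcases scanA_yes_or_no (digitsA N) (PySem.List.pyRange 0 K 1) with hy | hn
            · exact absurd (hcore.mp ⟨by omega,
                (range_cond_iff _ K hK).mp ((scanA_eq_yes_iff _ _).mp hy)⟩) hdvd
            · exact hn
      simp only [PySem.Int.mod_eq_zero_iff_dvd,
        if_neg (by omega : ¬ K ≤ 0), if_neg (by omega : ¬ N ≤ 0)]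
      rw [hA]
      by_cases hbl : K > (PySem.Int.bitLength N : Int)
      · rw [if_pos hbl]
        have hnd : ¬ (3:Int) ^ K.toNat ∣ N := by
          intro hdvd
          have hle : (3:Int) ^ K.toNat ≤ N := Int.le_of_dvd hN hdvd
          have h2 : N.natAbs < 2 ^ PySem.Int.bitLength N := PySem.Int.lt_two_pow_bitLength N
          have hNlt : N < (2:Int) ^ PySem.Int.bitLength N :=
            calc N ≤ (N.natAbs : Int) := Int.le_natAbs
              _ < ((2 ^ PySem.Int.bitLength N : Nat) : Int) := by exact_mod_cast h2
              _ = (2:Int) ^ PySem.Int.bitLength N := by push_cast; ring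
          have hble : PySem.Int.bitLength N ≤ K.toNat := by omega
          have h23 : (2:Int) ^ K.toNat ≤ (3:Int) ^ K.toNat :=
            pow_le_pow_left₀ (by norm_num) (by norm_num) _
          have h22 : (2:Int) ^ PySem.Int.bitLength N ≤ (2:Int) ^ K.toNat :=
            pow_le_pow_right₀ (by norm_num) hble
          omega
        rw [if_neg hnd]
      · rw [if_neg hbl]
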